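-- pv_equiv track=rewrite | github.com/sammilo/pawpal | app.py | fmt_availability
-- ===== SOURCE A (Python) =====
-- def fmt_hour(minutes: int) -> str:
--     """Convert minutes-from-midnight to a 12-hour display string (e.g. 480 → '8:00 AM', 510 → '8:30 AM')."""
--     h, m = divmod(minutes, 60)
--     h12 = h % 12 or 12
--     suffix = "AM" if h < 12 else "PM"
--     return f"{h12}:{m:02d} {suffix}"
--
-- def fmt_availability(availability: list) -> str:
--     """Convert a 1440-minute array to a human-readable ranges string (e.g. '8:00 AM–10:00 AM')."""
--     if not isinstance(availability, list) or len(availability) != 1440: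
--         return "—"
--     ranges = []
--     start = None
--     for i in range(1441):
--         is_avail = i < 1440 and availability[i] != 0
--         if is_avail and start is None:
--             start = i
--         elif not is_avail and start is not None:
--             ranges.append(f"{fmt_hour(start)}–{fmt_hour(i)}")
--             start = None
--     return ", ".join(ranges) or "—"
-- ===== SOURCE B (Python) =====
-- def fmt_hour(minutes: int) -> str:
--     """Convert minutes-from-midnight to a 12-hour display string (e.g. 480 → '8:00 AM', 510 → '8:30 AM')."""
--     h, m = divmod(minutes, 60)
--     h12 = h % 12 or 12
--     suffix = "AM" if h < 12 else "PM"
--     return f"{h12}:{m:02d} {suffix}"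
--
-- def fmt_availability(availability: list) -> str:
--     """Convert a 1440-minute array to a human-readable ranges string (e.g. '8:00 AM–10:00 AM')."""
--     if not isinstance(availability, list) or len(availability) != 1440:
--         return "—"
--     ranges = []
--     pos = 0
--     rest = availability
--     while rest:
--         n = 1
--         while n < len(rest) and (rest[n] != 0) == (rest[0] != 0):
--             n += 1
--         if rest[0] != 0:
--             ranges.append(f"{fmt_hour(pos)}–{fmt_hour(pos + n)}")
--         pos += n
--         rest = rest[n:]
--     return ", ".join(ranges) or "—"
-- ===== Notes on version B (the rewrite author's own statement) =====
-- stated objective: alternative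
-- what changed: Replaces A's per-minute sentinel state machine over range(1441) with a run-length decomposition: B repeatedly measures the next maximal run of equal truthiness and emits one range per nonzero run, so the per-index Optional[int] start state disappears.
import Mathlib
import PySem

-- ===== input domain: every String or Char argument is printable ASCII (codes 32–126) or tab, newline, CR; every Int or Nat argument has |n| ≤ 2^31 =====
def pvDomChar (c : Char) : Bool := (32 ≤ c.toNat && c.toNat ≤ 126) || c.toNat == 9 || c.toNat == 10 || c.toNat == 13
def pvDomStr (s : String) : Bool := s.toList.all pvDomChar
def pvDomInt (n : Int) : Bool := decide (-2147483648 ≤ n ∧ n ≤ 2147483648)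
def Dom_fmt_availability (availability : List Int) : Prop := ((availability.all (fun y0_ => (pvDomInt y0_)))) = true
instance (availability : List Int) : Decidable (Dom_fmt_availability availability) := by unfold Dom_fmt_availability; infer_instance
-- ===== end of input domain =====

-- B replaces A's per-minute sentinel state machine by a run-length decomposition
-- (measure each maximal run of equal truthiness, emit one range per nonzero run); objective: alternative.

-- ===== PORT A =====
-- shared helper: fmt_hour, identical in A and B
def fmt_hour (minutes : Int) : String :=
  let h := PySem.Int.floordiv minutes 60
  let m := PySem.Int.mod minutes 60
  let h12 := if PySem.Int.mod h 12 = 0 then (12 : Int) else PySem.Int.mod h 12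
  let suffix := if h < 12 then "AM" else "PM"
  PySem.Str.join "" [PySem.Int.toStr h12, ":", PySem.Str.zfill (PySem.Int.toStr m) 2, " ", suffix]

-- f"{fmt_hour(a)}–{fmt_hour(b)}"
def fmtRange (a b : Int) : String :=
  PySem.Str.join "" [fmt_hour a, "–", fmt_hour b]

-- A's for-loop over range(1441) with (ranges, start) state.  The Python guard
-- 'i < 1440 and availability[i] != 0' short-circuits, so the index read is only
-- reached for i < 1440; pyGetD's default 0 is never the decisive value.
def fmt_availability (availability : List Int) : String :=
  if availability.length = 1440 then
    let res := (PySem.List.pyRange 0 1441 1).foldl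
      (fun (st : List String × Option Int) (i : Int) =>
        let is_avail := decide (i < 1440) && decide (PySem.List.pyGetD availability i 0 ≠ 0)
        if is_avail then
          match st.2 with
          | none => (st.1, some i)
          | some _ => st
        else
          match st.2 with
          | some s => (st.1 ++ [fmtRange s i], none)
          | none => st) ([], none)
    let out := PySem.Str.join ", " res.1
    if out = "" then "—" else out
  else "—"

-- ===== PORT B =====
-- B's while-loop: each step measures the maximal run of entries with the same
-- truthiness as the head (n), emits one range if the run is nonzero, and drops the run.
def collectRuns (pos : Int) (xs : List Int) : List String :=
  match xs with
  | [] => []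
  | x :: t =>
    let n : Nat := 1 + (t.takeWhile (fun y => decide (y ≠ 0) == decide (x ≠ 0))).length
    let rest := collectRuns (pos + (n : Int)) (t.drop (n - 1))
    if x ≠ 0 then fmtRange pos (pos + (n : Int)) :: rest else rest
termination_by xs.length
decreasing_by simp

def fmt_availability_alt (availability : List Int) : String :=
  if availability.length = 1440 then
    let out := PySem.Str.join ", " (collectRuns 0 availability)
    if out = "" then "—" else out
  else "—"

-- ===== PRECONDITION & SPEC =====
def Spec_fmt_availability (availability : List Int) (out : String) : Prop := out = fmt_availability_alt availability
instance (availability : List Int) (out : String) : Decidable (Spec_fmt_availability availability out) := by unfold Spec_fmt_availability; infer_instance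

-- ===== CLAIM (what is proved, stated in full; the proofs are below) =====
def Claim_equal_fmt_availability : Prop := ∀ (availability : List Int), Dom_fmt_availability availability → Spec_fmt_availability availability (fmt_availability availability)

-- ===== LEMMAS AND PROOFS =====

-- A's loop, re-expressed as structural recursion over the suffix of the list
-- (k is the index of the head of ys inside availability).
def foldE : (List String × Option Int) → List Int → Nat → (List String × Option Int)
  | st, [], _ => st
  | st, y :: t, k =>
      if y ≠ 0 then
        match st.2 with
        | none => foldE (st.1, some (k : Int)) t (k + 1)
        | some _ => foldE st t (k + 1)
      else
        match st.2 with
        | some s => foldE (st.1 ++ [fmtRange s (k : Int)], none) t (k + 1)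
        | none => foldE st t (k + 1)

-- the effect of A's final iteration i = 1440 (is_avail is false there)
def finishF (st : List String × Option Int) (e : Int) : List String :=
  match st.2 with
  | none => st.1
  | some s => st.1 ++ [fmtRange s e]

lemma collectRuns_zero (pos : Int) (t : List Int) :
    collectRuns pos (0 :: t) = collectRuns (pos + 1) t := by
  match t with
  | [] => simp [collectRuns]
  | z :: t' =>
    by_cases hz : z = 0
    · subst hz
      show collectRuns pos (0 :: 0 :: t') = collectRuns (pos + 1) (0 :: t')
      rw [collectRuns, collectRuns]
      simp only [List.takeWhile_cons]
      norm_num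
      congr 1
      omega
    · rw [collectRuns]
      simp [hz, collectRuns]

lemma main_inv (nlen : Nat) : ∀ (ys : List Int), ys.length = nlen →
    (∀ (k : Nat) (acc : List String),
      finishF (foldE (acc, none) ys k) ((k : Int) + ys.length) = acc ++ collectRuns (k : Int) ys) ∧
    (∀ (k : Nat) (acc : List String) (s : Int),
      finishF (foldE (acc, some s) ys k) ((k : Int) + ys.length) =
        acc ++ fmtRange s ((k : Int) + ((ys.takeWhile (fun z => decide (z ≠ 0))).length : Int)) ::
          collectRuns ((k : Int) + ((ys.takeWhile (fun z => decide (z ≠ 0))).length : Int))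
            (ys.drop (ys.takeWhile (fun z => decide (z ≠ 0))).length)) := by
  induction nlen using Nat.strong_induction_on with
  | h n ih =>
    intro ys hys
    match ys with
    | [] =>
      constructor
      · intro k acc; simp [foldE, finishF, collectRuns]
      · intro k acc s; simp [foldE, finishF, collectRuns]
    | y :: t =>
      have hts : t.length < n := by simp at hys; omega
      obtain ⟨ihA, ihB⟩ := ih t.length hts t rfl
      have hpred : ∀ (hy : ¬ y = 0), (fun z : Int => decide (z ≠ 0) == decide (y ≠ 0)) = (fun z : Int => decide (z ≠ 0)) := by
        intro hy; funext z; simp [hy]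
      have hlen1 : ∀ (k : Nat), ((k : Int) + ((y :: t).length : Int)) = (((k+1 : Nat) : Int) + (t.length : Int)) := by
        intro k; rw [List.length_cons]; push_cast; ring
      constructor
      · intro k acc
        by_cases hy : y = 0
        · subst hy
          have step : foldE (acc, none) ((0:Int)::t) k = foldE (acc, none) t (k+1) := by
            simp [foldE]
          rw [step, collectRuns_zero, hlen1 k, ihA (k+1) acc]
          push_cast
          ring_nf
        · have step : foldE (acc, none) (y::t) k = foldE (acc, some (k:Int)) t (k+1) := by
            simp [foldE, hy]
          rw [step, hlen1 k, ihB (k+1) acc (k:Int), collectRuns, hpred hy, if_pos hy]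
          rw [show (1 + (List.takeWhile (fun z : Int => decide (z ≠ 0)) t).length - 1) = (List.takeWhile (fun z : Int => decide (z ≠ 0)) t).length from by omega]
          push_cast
          ring_nf
      · intro k acc s
        by_cases hy : y = 0
        · subst hy
          have step : foldE (acc, some s) ((0:Int)::t) k = foldE (acc ++ [fmtRange s (k:Int)], none) t (k+1) := by
            simp [foldE]
          rw [step, hlen1 k, ihA (k+1) (acc ++ [fmtRange s (k:Int)])]
          rw [show (List.takeWhile (fun z : Int => decide (z ≠ 0)) ((0:Int)::t)) = [] by simp]
          simp only [List.length_nil, Nat.cast_zero, add_zero, List.drop_zero]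
          rw [collectRuns_zero]
          rw [List.append_assoc, List.singleton_append]
          push_cast
          ring_nf
        · have step : foldE (acc, some s) (y::t) k = foldE (acc, some s) t (k+1) := by
            simp [foldE, hy]
          rw [step, hlen1 k, ihB (k+1) acc s]
          rw [show (List.takeWhile (fun z : Int => decide (z ≠ 0)) (y::t)) = y :: List.takeWhile (fun z : Int => decide (z ≠ 0)) t by simp [hy]]
          rw [List.length_cons, List.drop_succ_cons]
          push_cast
          ring_nf

-- bridge: the foldl of A's port over pyRange k 1440 1 equals foldE on the suffix
lemma bridge (xs : List Int) :
    ∀ (ys : List Int) (k : Nat), k + ys.length = 1440 → ys = xs.drop k → ∀ st,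
    (PySem.List.pyRange (k : Int) 1440 1).foldl
      (fun (st : List String × Option Int) (i : Int) =>
        let is_avail := decide (i < 1440) && decide (PySem.List.pyGetD xs i 0 ≠ 0)
        if is_avail then
          match st.2 with
          | none => (st.1, some i)
          | some _ => st
        else
          match st.2 with
          | some s => (st.1 ++ [fmtRange s i], none)
          | none => st) st
      = foldE st ys k := by
  intro ys
  induction ys with
  | nil =>
    intro k hk hd st
    have : (1440 : Int) ≤ (k : Int) := by simp at hk; omega
    rw [PySem.List.pyRange_one_eq_nil this]
    simp [foldE]
  | cons y t ih =>
    intro k hk hd st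
    have hk14 : k < 1440 := by simp at hk; omega
    have hlt : (k : Int) < 1440 := by exact_mod_cast hk14
    rw [PySem.List.pyRange_one_cons hlt]
    have hval : PySem.List.pyGetD xs (k : Int) 0 = y := by
      have h0 : (xs.drop k)[0]? = some y := by rw [← hd]; simp
      rw [List.getElem?_drop] at h0
      rw [PySem.List.pyGetD_natCast]
      simp only [Nat.add_zero] at h0
      simp [List.getD_eq_getElem?_getD, h0]
    have ht : t = xs.drop (k + 1) := by
      have := congrArg (List.drop 1) hd
      simpa [List.drop_drop] using this
    have hcast : ((k : Int) + 1) = ((k + 1 : Nat) : Int) := by push_cast; ring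
    simp only [List.foldl_cons]
    rw [hcast, ih (k+1) (by simp at hk ⊢; omega) ht]
    obtain ⟨acc, start⟩ := st
    by_cases hy : y = 0
    · cases start <;> simp [foldE, hy, hval, hlt]
    · cases start <;> simp [foldE, hy, hval, hlt]

-- ===== VERDICT (by name: the statement is the Claim_ definition above) =====
-- A's whole fold (including the final i = 1440 flush) equals B's run decomposition
lemma Afold (xs : List Int) (hl : xs.length = 1440) :
    ((PySem.List.pyRange 0 1441 1).foldl
      (fun (st : List String × Option Int) (i : Int) =>
        let is_avail := decide (i < 1440) && decide (PySem.List.pyGetD xs i 0 ≠ 0)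
        if is_avail then
          match st.2 with
          | none => (st.1, some i)
          | some _ => st
        else
          match st.2 with
          | some s => (st.1 ++ [fmtRange s i], none)
          | none => st) ([], none)).1 = collectRuns 0 xs := by
  have hsplit : PySem.List.pyRange 0 1441 1 = PySem.List.pyRange 0 1440 1 ++ [(1440 : Int)] := by
    have := PySem.List.pyRange_one_succ_right (a := 0) (b := 1440) (by norm_num)
    norm_num at this ⊢
    exact this
  have hb := bridge xs xs 0 (by simpa using hl) (by simp) ([], none)
  simp only [Nat.cast_zero] at hb
  have hm := (main_inv xs.length xs rfl).1 0 []
  rw [hl] at hm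
  simp only [Nat.cast_zero, List.nil_append, Nat.cast_ofNat, zero_add] at hm
  rw [hsplit, List.foldl_append, hb, List.foldl_cons, List.foldl_nil]
  rcases hE : foldE ([], none) xs 0 with ⟨a, o⟩
  rw [hE] at hm
  cases o with
  | none =>
    simp only [finishF] at hm
    norm_num
    exact hm
  | some s =>
    simp only [finishF] at hm
    norm_num
    exact hm

theorem fmt_availability_spec : Claim_equal_fmt_availability := by
  intro xs _
  unfold Spec_fmt_availability fmt_availability fmt_availability_alt
  by_cases hl : xs.length = 1440
  · rw [if_pos hl, if_pos hl]
    simp only [Afold xs hl]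
  · rw [if_neg hl, if_neg hl]
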